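-- pv_equiv track=rewrite | github.com/SanjanaSidhwani/brain-mri-image-processing | src/preprocessing/modality_detection.py | _infer_custom_modality
-- ===== SOURCE A (Python) =====
-- MODALITY_STOPWORDS = {
--     "brats",
--     "training",
--     "validation",
--     "patient",
--     "subject",
--     "scan",
--     "series",
--     "image",
--     "volume",
--     "nii",
--     "gz",
--     "mr",
--     "mri",
--     "anon",
--     "masked",
--     "brain",
--     "oasis",
--     "ixi",
-- }
--
-- CUSTOM_MODALITY_HINTS = {
--     "adc",
--     "dwi",
--     "dti",
--     "swi",
--     "gre",
--     "epi",
--     "asl",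
--     "tof",
--     "mprage",
--     "mpr",
--     "mra",
--     "fse",
--     "b0",
--     "b1000",
--     "tracew",
-- }
--
-- def _infer_custom_modality(tokens) -> str:
--     for token in tokens:
--         if token in CUSTOM_MODALITY_HINTS:
--             return token
--
--     for token in tokens:
--         if token in MODALITY_STOPWORDS:
--             continue
--
--         # Keep concise alpha-numeric modality-like tokens.
--         if 2 <= len(token) <= 16 and any(ch.isalpha() for ch in token):
--             if token.startswith("t1") or token.startswith("t2"):
--                 continue
--             if token.isdigit():
--                 continue
--             return token
--
--     return "unknown"
-- ===== SOURCE B (Python) =====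
-- MODALITY_STOPWORDS = {
--     "brats", "training", "validation", "patient", "subject", "scan",
--     "series", "image", "volume", "nii", "gz", "mr", "mri", "anon",
--     "masked", "brain", "oasis", "ixi",
-- }
--
-- CUSTOM_MODALITY_HINTS = {
--     "adc", "dwi", "dti", "swi", "gre", "epi", "asl", "tof",
--     "mprage", "mpr", "mra", "fse", "b0", "b1000", "tracew",
-- }
--
--
-- def _is_modality_like(token):
--     return (token not in MODALITY_STOPWORDS
--             and 2 <= len(token) <= 16
--             and any(ch.isalpha() for ch in token)
--             and not token.startswith(("t1", "t2"))
--             and not token.isdigit())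
--
--
-- def _infer_custom_modality(tokens) -> str:
--     candidate = None
--     for token in tokens:
--         if token in CUSTOM_MODALITY_HINTS:
--             return token
--         if candidate is None and _is_modality_like(token):
--             candidate = token
--     return candidate if candidate is not None else "unknown"
-- ===== Notes on version B (the rewrite author's own statement) =====
-- stated objective: simpler
-- what changed: Replaced A's two sequential passes over tokens by a single pass that returns a hint immediately and records the first fallback candidate, with the fallback filter factored into one predicate.
import Mathlib
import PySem

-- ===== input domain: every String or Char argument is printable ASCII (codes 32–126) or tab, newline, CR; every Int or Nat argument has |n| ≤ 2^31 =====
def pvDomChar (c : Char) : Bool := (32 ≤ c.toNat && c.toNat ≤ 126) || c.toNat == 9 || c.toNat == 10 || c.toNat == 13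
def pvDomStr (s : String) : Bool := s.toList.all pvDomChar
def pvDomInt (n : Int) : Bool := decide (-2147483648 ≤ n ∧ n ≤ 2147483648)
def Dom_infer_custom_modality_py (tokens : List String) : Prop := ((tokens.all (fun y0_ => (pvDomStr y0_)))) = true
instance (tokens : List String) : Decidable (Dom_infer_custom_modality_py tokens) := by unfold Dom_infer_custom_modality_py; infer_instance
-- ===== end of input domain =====

-- B merges A's two sequential passes into one loop that returns a hint immediately and records the first fallback candidate (objective: simpler).
-- ===== PORT A =====
def pvStopwords : List String :=
  ["brats", "training", "validation", "patient", "subject", "scan", "series",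
   "image", "volume", "nii", "gz", "mr", "mri", "anon", "masked", "brain",
   "oasis", "ixi"]

def pvHints : List String :=
  ["adc", "dwi", "dti", "swi", "gre", "epi", "asl", "tof", "mprage", "mpr",
   "mra", "fse", "b0", "b1000", "tracew"]

-- first loop of A: return the first token in CUSTOM_MODALITY_HINTS
def pvPass1 : List String → Option String
  | [] => none
  | t :: ts => if pvHints.contains t then some t else pvPass1 ts

-- second loop of A, branches in source order (continue = recurse on the tail)
def pvPass2 : List String → Option String
  | [] => none
  | t :: ts =>
    if pvStopwords.contains t then pvPass2 ts
    else if 2 ≤ PySem.Str.len t && PySem.Str.len t ≤ 16 && t.toList.any PySem.Chars.isalpha then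
      if PySem.Str.startswith t "t1" || PySem.Str.startswith t "t2" then pvPass2 ts
      else if PySem.Str.strIsdigit t then pvPass2 ts
      else some t
    else pvPass2 ts

def infer_custom_modality_py (tokens : List String) : String :=
  match pvPass1 tokens with
  | some t => t
  | none =>
    match pvPass2 tokens with
    | some t => t
    | none => "unknown"

-- ===== PORT B =====
-- Source B's _is_modality_like
def pvIsModalityLike (t : String) : Bool :=
  !pvStopwords.contains t
    && (2 ≤ PySem.Str.len t && PySem.Str.len t ≤ 16)
    && t.toList.any PySem.Chars.isalpha
    && !(PySem.Str.startswith t "t1" || PySem.Str.startswith t "t2")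
    && !PySem.Str.strIsdigit t

-- Source B's single loop carrying the fallback candidate
def pvAltLoop : List String → Option String → String
  | [], cand => cand.getD "unknown"
  | t :: ts, cand =>
    if pvHints.contains t then t
    else pvAltLoop ts (if cand.isNone && pvIsModalityLike t then some t else cand)

def infer_custom_modality_py_alt (tokens : List String) : String :=
  pvAltLoop tokens none

-- ===== PRECONDITION & SPEC =====
def Spec_infer_custom_modality_py (tokens : List String) (out : String) : Prop := out = infer_custom_modality_py_alt tokens
instance (tokens : List String) (out : String) : Decidable (Spec_infer_custom_modality_py tokens out) := by unfold Spec_infer_custom_modality_py; infer_instance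

-- ===== CLAIM (what is proved, stated in full; the proofs are below) =====
def Claim_equal_infer_custom_modality_py : Prop := ∀ (tokens : List String), Dom_infer_custom_modality_py tokens → Spec_infer_custom_modality_py tokens (infer_custom_modality_py tokens)

-- ===== LEMMAS AND PROOFS =====
-- the second loop of A, one step: the head contributes iff it passes B's predicate
lemma pvPass2_cons (t : String) (ts : List String) :
    pvPass2 (t :: ts) = (if pvIsModalityLike t then some t else none).orElse (fun _ => pvPass2 ts) := by
  by_cases h1 : pvStopwords.contains t = true <;>
  by_cases h2 : (2 ≤ PySem.Str.len t && PySem.Str.len t ≤ 16) = true <;>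
  by_cases h3 : (t.toList.any PySem.Chars.isalpha) = true <;>
  by_cases h4 : (PySem.Str.startswith t "t1" || PySem.Str.startswith t "t2") = true <;>
  by_cases h5 : (PySem.Str.strIsdigit t) = true <;>
  simp_all [pvPass2, pvIsModalityLike, Option.orElse] <;> split_ifs <;> simp_all

-- B's loop computes A's two-pass answer, for any pending candidate
lemma pvAltLoop_eq (tokens : List String) (cand : Option String) :
    pvAltLoop tokens cand =
      match pvPass1 tokens with
      | some t => t
      | none => (cand.orElse fun _ => pvPass2 tokens).getD "unknown" := by
  induction tokens generalizing cand with
  | nil => cases cand <;> simp [pvAltLoop, pvPass1, pvPass2, Option.orElse]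
  | cons t ts ih =>
    simp only [pvAltLoop, pvPass1]
    cases hh : pvHints.contains t
    · simp only [Bool.false_eq_true, if_false]
      rw [ih, pvPass2_cons]
      cases cand <;> cases hf : pvIsModalityLike t <;>
        simp [Option.orElse, Option.isNone]
    · simp
  
-- ===== VERDICT (by name: the statement is the Claim_ definition above) =====
theorem infer_custom_modality_py_spec : Claim_equal_infer_custom_modality_py := by
  intro tokens _
  unfold Spec_infer_custom_modality_py infer_custom_modality_py infer_custom_modality_py_alt
  rw [pvAltLoop_eq]
  cases h : pvPass1 tokens <;> cases h2 : pvPass2 tokens <;> simp [Option.orElse]
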